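-- pv_equiv track=rewrite | github.com/BradMcDanel/term-quantization | booth.py | radix_4
-- ===== SOURCE A (Python) =====
-- def radix_4(number):
--     char_number = bin(number).split('b')[1]
--     if bin(number)[0] == '-':
--         sign = -1
--     else:
--         sign = 1
--     char_number = char_number + '0'
--     char_number = '00' + char_number
--     char_number = char_number[::-1]
--     exponents = []
--     bit_pos = 0
--     for i in range(1, len(char_number) - 1, 2):
--         b1 = char_number[i-1]
--         b2 = char_number[i]
--         b3 = char_number[i+1]
--         if b3 == '0' and b2 == '0' and b1 == '0':
--             pass
--         elif b3 == '0' and b2 == '0' and b1 == '1':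
--             exponents.append(2**bit_pos)
--         elif b3 == '0' and b2 == '1' and b1 == '0':
--             exponents.append(2**bit_pos)
--         elif b3 == '0' and b2 == '1' and b1 == '1':
--             exponents.append(2**(bit_pos+1))
--         elif b3 == '1' and b2 == '0' and b1 == '0':
--             exponents.append(-2**(bit_pos+1))
--         elif b3 == '1' and b2 == '0' and b1 == '1':
--             exponents.append(-2**bit_pos)
--         elif b3 == '1' and b2 == '1' and b1 == '0':
--             exponents.append(-2**bit_pos)
--         elif b3 == '1' and b2 == '1' and b1 == '1':
--             pass
--
--         bit_pos += 2
--
--     return exponents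
-- ===== SOURCE B (Python) =====
-- def radix_4(number):
--     # Integer Booth radix-4 recoding of |number| (A's computed sign is unused):
--     # carry the bit below the current pair and recode d = low + b0 - 2*b1.
--     n = abs(number)
--     low = 0
--     pos = 0
--     exponents = []
--     while n or low:
--         b0 = n & 1
--         b1 = (n >> 1) & 1
--         d = low + b0 - 2 * b1
--         if d:
--             exponents.append(d * (1 << pos))
--         low = b1
--         n >>= 2
--         pos += 2
--     return exponents
-- ===== Notes on version B (the rewrite author's own statement) =====
-- stated objective: simpler
-- what changed: Replaces the bin()-string pipeline (pad, reverse, index triples, eight-branch character table) with direct integer Booth recoding of the magnitude using shifts and masks and an arithmetic digit with a carried low bit.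
import Mathlib
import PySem

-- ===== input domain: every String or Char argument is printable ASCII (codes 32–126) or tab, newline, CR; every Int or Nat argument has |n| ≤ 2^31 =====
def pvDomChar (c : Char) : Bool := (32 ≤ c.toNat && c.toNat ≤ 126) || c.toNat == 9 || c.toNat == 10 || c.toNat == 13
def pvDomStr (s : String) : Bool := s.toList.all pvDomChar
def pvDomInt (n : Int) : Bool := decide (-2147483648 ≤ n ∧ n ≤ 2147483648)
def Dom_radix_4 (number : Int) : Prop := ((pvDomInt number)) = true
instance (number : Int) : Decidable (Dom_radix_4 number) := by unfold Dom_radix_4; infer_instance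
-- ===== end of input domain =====

-- B replaces A's bin()-string/branch-table Booth recoding by integer shift/mask recoding (objective: simpler).

-- ===== PORT A =====
-- Python's bin(n) has no PySem primitive; ported by hand.
-- pyBinDigits n = the binary digits of n, most significant first, no leading zeros ([] for 0); exact.
def pyBinDigits (n : Nat) : List Char :=
  if n = 0 then []
  else pyBinDigits (n / 2) ++ [if n % 2 = 1 then '1' else '0']
decreasing_by omega

-- bin(number) : exact ('-0b…' for negatives, '0b…' otherwise, bin(0) = '0b0'), as a char list.
def pyBin (number : Int) : List Char :=
  (if number < 0 then ['-'] else []) ++ ['0', 'b'] ++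
    (if number.natAbs = 0 then ['0'] else pyBinDigits number.natAbs)

-- .split('b')[1] : the suffix after the (unique) 'b'; exact on bin's output, where 'b' occurs exactly once.
def pyBinAfterB (cs : List Char) : List Char := (cs.dropWhile (· ≠ 'b')).drop 1

-- body of A's for-loop (the 8-branch elif chain), on state (exponents, bit_pos)
def radix4Step (cn : List Char) (st : List Int × Nat) (i : Int) : List Int × Nat :=
  let b1 := PySem.List.pyGetD cn (i - 1) ' '
  let b2 := PySem.List.pyGetD cn i ' '
  let b3 := PySem.List.pyGetD cn (i + 1) ' '
  let exps := st.1
  let bp := st.2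
  (if b3 = '0' ∧ b2 = '0' ∧ b1 = '0' then exps
   else if b3 = '0' ∧ b2 = '0' ∧ b1 = '1' then exps ++ [2 ^ bp]
   else if b3 = '0' ∧ b2 = '1' ∧ b1 = '0' then exps ++ [2 ^ bp]
   else if b3 = '0' ∧ b2 = '1' ∧ b1 = '1' then exps ++ [2 ^ (bp + 1)]
   else if b3 = '1' ∧ b2 = '0' ∧ b1 = '0' then exps ++ [-(2 ^ (bp + 1))]
   else if b3 = '1' ∧ b2 = '0' ∧ b1 = '1' then exps ++ [-(2 ^ bp)]
   else if b3 = '1' ∧ b2 = '1' ∧ b1 = '0' then exps ++ [-(2 ^ bp)]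
   else exps,
   bp + 2)

def radix_4 (number : Int) : List Int :=
  let char_number := pyBinAfterB (pyBin number)
  let _sign : Int := if PySem.List.pyGetD (pyBin number) 0 ' ' = '-' then -1 else 1  -- computed, unused (as in A)
  let char_number := char_number ++ ['0']
  let char_number := ['0', '0'] ++ char_number
  -- char_number[::-1]
  let char_number := (PySem.List.slice? char_number none none (-1)).getD []
  let st := (PySem.List.pyRange 1 ((char_number.length : Int) - 1) 2).foldl (radix4Step char_number) ([], 0)
  st.1

-- ===== PORT B =====
-- the while-loop of Source B: while n or low, recode d = low + b0 - 2*b1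
def boothLoop (n low pos : Nat) : List Int :=
  if n = 0 ∧ low = 0 then []
  else
    let b0 := n % 2
    let b1 := n / 2 % 2
    let d : Int := (low : Int) + (b0 : Int) - 2 * (b1 : Int)
    (if d ≠ 0 then [d * 2 ^ pos] else []) ++ boothLoop (n / 4) b1 (pos + 2)
termination_by n + low
decreasing_by omega

def radix_4_alt (number : Int) : List Int := boothLoop number.natAbs 0 0

-- ===== PRECONDITION & SPEC =====
def Spec_radix_4 (number : Int) (out : List Int) : Prop := out = radix_4_alt number
instance (number : Int) (out : List Int) : Decidable (Spec_radix_4 number out) := by unfold Spec_radix_4; infer_instance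

-- ===== CLAIM (what is proved, stated in full; the proofs are below) =====
def Claim_equal_radix_4 : Prop := ∀ (number : Int), Dom_radix_4 number → Spec_radix_4 number (radix_4 number)

-- ===== LEMMAS AND PROOFS =====

-- character of one bit
def bc (b : Nat) : Char := if b % 2 = 1 then '1' else '0'

-- the binary digits of n, least significant first ([] for 0)
def bits (n : Nat) : List Char :=
  if n = 0 then [] else bc (n % 2) :: bits (n / 2)
decreasing_by omega

-- the appended elements of one pass through A's branch table
def boothOut (b1 b2 b3 : Char) (pos : Nat) : List Int :=
  if b3 = '0' ∧ b2 = '0' ∧ b1 = '0' then []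
  else if b3 = '0' ∧ b2 = '0' ∧ b1 = '1' then [2 ^ pos]
  else if b3 = '0' ∧ b2 = '1' ∧ b1 = '0' then [2 ^ pos]
  else if b3 = '0' ∧ b2 = '1' ∧ b1 = '1' then [2 ^ (pos + 1)]
  else if b3 = '1' ∧ b2 = '0' ∧ b1 = '0' then [-(2 ^ (pos + 1))]
  else if b3 = '1' ∧ b2 = '0' ∧ b1 = '1' then [-(2 ^ pos)]
  else if b3 = '1' ∧ b2 = '1' ∧ b1 = '0' then [-(2 ^ pos)]
  else []

-- A's loop, structurally: consume two chars per step, remembering the previous char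
def loopChars : Char → List Char → Nat → List Int → List Int
  | _, [], _, acc => acc
  | _, [_], _, acc => acc
  | prev, b2 :: b3 :: rest, pos, acc => loopChars b3 rest (pos + 2) (acc ++ boothOut prev b2 b3 pos)

theorem boothLoop_base (pos : Nat) : boothLoop 0 0 pos = [] := by
  rw [boothLoop.eq_def, if_pos ⟨rfl, rfl⟩]

theorem boothLoop_succ (n low pos : Nat) (h : ¬(n = 0 ∧ low = 0)) :
    boothLoop n low pos =
      (if ((low : Int) + ((n % 2 : Nat) : Int) - 2 * ((n / 2 % 2 : Nat) : Int)) ≠ 0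
        then [((low : Int) + ((n % 2 : Nat) : Int) - 2 * ((n / 2 % 2 : Nat) : Int)) * 2 ^ pos]
        else []) ++ boothLoop (n / 4) (n / 2 % 2) (pos + 2) := by
  rw [boothLoop.eq_def, if_neg h]

theorem radix4Step_eq (cn : List Char) (exps : List Int) (bp : Nat) (i : Int) :
    radix4Step cn (exps, bp) i =
      (exps ++ boothOut (PySem.List.pyGetD cn (i - 1) ' ') (PySem.List.pyGetD cn i ' ')
        (PySem.List.pyGetD cn (i + 1) ' ') bp, bp + 2) := by
  simp only [radix4Step, boothOut]
  split_ifs <;> simp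

theorem pyRange_two_nil (a b : Int) (h : b ≤ a) : PySem.List.pyRange a b 2 = [] := by
  rw [PySem.List.pyRange_of_pos a b (by norm_num)]
  rw [if_neg (by omega)]
  simp

theorem pyRange_two_cons (a b : Int) (h : a < b) :
    PySem.List.pyRange a b 2 = a :: PySem.List.pyRange (a + 2) b 2 := by
  rw [PySem.List.pyRange_of_pos a b (by norm_num), PySem.List.pyRange_of_pos (a + 2) b (by norm_num)]
  have hc : (if a < b then ((b - a + 2 - 1) / 2).toNat else 0)
      = (if a + 2 < b then ((b - (a + 2) + 2 - 1) / 2).toNat else 0) + 1 := by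
    split_ifs <;> omega
  rw [hc, List.range_succ_eq_map, List.map_cons, List.map_map]
  congr 1
  · norm_num
  · exact List.map_congr_left (fun k _ => by simp only [Function.comp_apply]; push_cast; ring)

theorem foldA (xs : List Char) :
    ∀ (m : Nat) (rest : List Char) (prev : Char) (j : Nat) (acc : List Int) (pos : Nat),
      rest.length = m → xs.drop j = prev :: rest →
      ((PySem.List.pyRange ((j : Int) + 1) ((xs.length : Int) - 1) 2).foldl
          (radix4Step xs) (acc, pos)).1 = loopChars prev rest pos acc := by
  intro m
  induction m using Nat.strong_induction_on with
  | _ m ih =>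
    intro rest prev j acc pos hm hdrop
    have hjlt : j < xs.length := by
      by_contra h
      simp [List.drop_eq_nil_of_le (Nat.le_of_not_lt h)] at hdrop
    have hlen : xs.length = j + rest.length + 1 := by
      have := congrArg List.length hdrop
      simp [List.length_drop] at this
      omega
    match rest, hm with
    | [], hm =>
      rw [pyRange_two_nil _ _ (by simp at hlen; omega)]
      simp [loopChars]
    | [b2], hm =>
      rw [pyRange_two_nil _ _ (by simp at hlen; omega)]
      simp [loopChars]
    | b2 :: b3 :: rest', hm =>
      have hget : ∀ k : Nat, k < 3 → xs[j + k]? = (prev :: b2 :: b3 :: rest')[k]? := by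
        intro k hk
        rw [← hdrop, List.getElem?_drop]
      have h0 : xs[j]? = some prev := by have := hget 0 (by omega); simpa using this
      have h1 : xs[j + 1]? = some b2 := by have := hget 1 (by omega); simpa using this
      have h2 : xs[j + 2]? = some b3 := by have := hget 2 (by omega); simpa using this
      rw [pyRange_two_cons _ _ (by simp at hlen; omega)]
      rw [List.foldl_cons, radix4Step_eq]
      have g0 : PySem.List.pyGetD xs ((j : Int) + 1 - 1) ' ' = prev := by
        rw [show ((j : Int) + 1 - 1) = ((j : Nat) : Int) by ring, PySem.List.pyGetD_natCast,
          List.getD_eq_getElem?_getD, h0]; rfl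
      have g1 : PySem.List.pyGetD xs ((j : Int) + 1) ' ' = b2 := by
        rw [show ((j : Int) + 1) = (((j + 1 : Nat)) : Int) by push_cast; ring, PySem.List.pyGetD_natCast,
          List.getD_eq_getElem?_getD, h1]; rfl
      have g2 : PySem.List.pyGetD xs ((j : Int) + 1 + 1) ' ' = b3 := by
        rw [show ((j : Int) + 1 + 1) = (((j + 2 : Nat)) : Int) by push_cast; ring, PySem.List.pyGetD_natCast,
          List.getD_eq_getElem?_getD, h2]; rfl
      rw [g0, g1, g2]
      have hdrop' : xs.drop (j + 2) = b3 :: rest' := by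
        have h2d := congrArg (List.drop 2) hdrop
        rw [List.drop_drop] at h2d
        simpa [Nat.add_comm] using h2d
      rw [show ((j : Int) + 1 + 2) = (((j + 2 : Nat)) : Int) + 1 by push_cast; ring]
      rw [show loopChars prev (b2 :: b3 :: rest') pos acc
            = loopChars b3 rest' (pos + 2) (acc ++ boothOut prev b2 b3 pos) from rfl]
      exact ih rest'.length (by simp at hm; omega) rest' b3 (j + 2)
        (acc ++ boothOut prev b2 b3 pos) (pos + 2) rfl hdrop'

theorem pyBinAfterB_bin (number : Int) :
    pyBinAfterB (pyBin number) =
      (if number.natAbs = 0 then ['0'] else pyBinDigits number.natAbs) := by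
  unfold pyBin pyBinAfterB
  by_cases h : number < 0 <;> simp [h, List.dropWhile]

theorem bits_rev (n : Nat) : (pyBinDigits n).reverse = bits n := by
  induction n using Nat.strong_induction_on with
  | _ n ih =>
    by_cases h : n = 0
    · subst h; simp [pyBinDigits, bits]
    · rw [pyBinDigits, if_neg h, bits, if_neg h]
      rw [List.reverse_append]
      simp only [List.reverse_cons, List.reverse_nil, List.nil_append, List.cons_append]
      rw [ih (n / 2) (by omega)]
      congr 1
      have : n % 2 % 2 = n % 2 := by omega
      simp [bc, this]

theorem boothOut_eq (a b0 b1 : Nat) (ha : a ≤ 1) (hb0 : b0 ≤ 1) (hb1 : b1 ≤ 1) (pos : Nat) :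
    boothOut (bc a) (bc b0) (bc b1) pos =
      (if ((a : Int) + (b0 : Int) - 2 * (b1 : Int)) ≠ 0
        then [((a : Int) + (b0 : Int) - 2 * (b1 : Int)) * 2 ^ pos] else []) := by
  interval_cases a <;> interval_cases b0 <;> interval_cases b1 <;>
    simp [boothOut, bc, pow_succ] <;> ring

theorem loop_booth (m : Nat) : ∀ (n low pos : Nat) (acc : List Int), n = m → low ≤ 1 →
    loopChars (bc low) (bits n ++ ['0', '0']) pos acc = acc ++ boothLoop n low pos := by
  induction m using Nat.strong_induction_on with
  | _ m ih =>
    intro n low pos acc hn hlow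
    subst hn
    by_cases h0 : n = 0
    · subst h0
      rw [bits, if_pos rfl]
      interval_cases low
      · rw [show loopChars (bc 0) (([] : List Char) ++ ['0', '0']) pos acc
              = acc ++ boothOut '0' '0' '0' pos from rfl]
        rw [boothLoop_base, show boothOut '0' '0' '0' pos = [] by simp [boothOut]]
      · rw [show loopChars (bc 1) (([] : List Char) ++ ['0', '0']) pos acc
              = acc ++ boothOut '1' '0' '0' pos from rfl]
        rw [show boothOut '1' '0' '0' pos = [2 ^ pos] by simp [boothOut]]
        rw [boothLoop_succ 0 1 pos (by omega)]
        norm_num [boothLoop_base]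
    · by_cases h1 : n = 1
      · subst h1
        rw [bits, if_neg h0]
        rw [show (1 : Nat) % 2 = 1 from rfl, show (1 : Nat) / 2 = 0 from rfl, bits, if_pos rfl]
        simp only [List.cons_append, List.nil_append]
        rw [show loopChars (bc low) (bc 1 :: '0' :: ['0']) pos acc
              = acc ++ boothOut (bc low) (bc 1) '0' pos from rfl]
        rw [show ('0' : Char) = bc 0 from rfl]
        rw [boothOut_eq low 1 0 hlow (by omega) (by omega)]
        rw [boothLoop_succ 1 low pos (by omega)]
        rw [show (1 : Nat) % 2 = 1 from rfl, show (1 : Nat) / 2 % 2 = 0 from rfl,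
          show (1 : Nat) / 4 = 0 from rfl]
        rw [boothLoop_base]
        interval_cases low <;> norm_num
      · rw [bits, if_neg h0, bits, if_neg (by omega)]
        rw [show n / 2 / 2 = n / 4 from by omega]
        simp only [List.cons_append]
        rw [show loopChars (bc low) (bc (n % 2) :: bc (n / 2 % 2) :: (bits (n / 4) ++ ['0', '0'])) pos acc
              = loopChars (bc (n / 2 % 2)) (bits (n / 4) ++ ['0', '0']) (pos + 2)
                (acc ++ boothOut (bc low) (bc (n % 2)) (bc (n / 2 % 2)) pos) from rfl]
        rw [ih (n / 4) (by omega) (n / 4) (n / 2 % 2) (pos + 2) _ rfl (by omega)]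
        rw [boothOut_eq low (n % 2) (n / 2 % 2) hlow (by omega) (by omega)]
        rw [boothLoop_succ n low pos (by omega)]
        simp [List.append_assoc]

theorem radix_4_eq_loopChars (number : Int) :
    radix_4 number = loopChars '0'
      ((if number.natAbs = 0 then ['0'] else bits number.natAbs) ++ ['0', '0']) 0 [] := by
  simp only [radix_4, pyBinAfterB_bin, PySem.List.slice?_none_none_neg_one, Option.getD_some]
  set bp := (if number.natAbs = 0 then ['0'] else pyBinDigits number.natAbs) with hbp
  have hrev : (['0', '0'] ++ (bp ++ ['0'])).reverse = '0' :: (bp.reverse ++ ['0', '0']) := by simp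
  rw [hrev]
  have hfold := foldA ('0' :: (bp.reverse ++ ['0', '0'])) (bp.reverse ++ ['0', '0']).length
    (bp.reverse ++ ['0', '0']) '0' 0 [] 0 rfl (by simp)
  rw [show (((0 : Nat) : Int) + 1) = (1 : Int) by norm_num] at hfold
  rw [hfold]
  have hbits : bp.reverse = (if number.natAbs = 0 then ['0'] else bits number.natAbs) := by
    rw [hbp]; split_ifs <;> simp [bits_rev]
  rw [hbits]

-- ===== VERDICT (by name: the statement is the Claim_ definition above) =====
theorem radix_4_spec : Claim_equal_radix_4 := by
  intro number _
  unfold Spec_radix_4 radix_4_alt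
  rw [radix_4_eq_loopChars]
  by_cases h : number.natAbs = 0
  · rw [if_pos h, h]
    show loopChars '0' ['0', '0', '0'] 0 [] = boothLoop 0 0 0
    simp [loopChars, boothLoop, boothOut]
  · rw [if_neg h]
    have := loop_booth number.natAbs number.natAbs 0 0 [] rfl (by omega)
    simpa [bc] using this
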